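-- pv_equiv track=rewrite | github.com/triplelog/math-errors | calculus/checkcorrect.py | full_sq
-- ===== SOURCE A (Python) =====
-- def full_sq(input_string):
-- 	openpar = 0
-- 	isbreak = 0
-- 	for idx,i in enumerate(input_string):
-- 		if i == '(':
-- 			openpar = openpar+1
-- 		elif i == ')':
-- 			openpar = openpar-1
-- 		if openpar == 0:
-- 			isbreak = idx
-- 			break
-- 	return isbreak
-- ===== SOURCE B (Python) =====
-- def full_sq(input_string):
--     # Pass 1: build the cumulative parenthesis-balance table.
--     cums = []
--     total = 0
--     for c in input_string:
--         total += 1 if c == '(' else -1 if c == ')' else 0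
--         cums.append(total)
--     # Pass 2: first index whose cumulative balance is 0; 0 if none.
--     return next((i for i, v in enumerate(cums) if v == 0), 0)
-- ===== Notes on version B (the rewrite author's own statement) =====
-- stated objective: alternative
-- what changed: B replaces A's fused early-exit scan with two separate passes: it first builds the full cumulative parenthesis-balance table, then searches that table for the first index whose value is 0 (returning 0 if none).
import Mathlib
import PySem

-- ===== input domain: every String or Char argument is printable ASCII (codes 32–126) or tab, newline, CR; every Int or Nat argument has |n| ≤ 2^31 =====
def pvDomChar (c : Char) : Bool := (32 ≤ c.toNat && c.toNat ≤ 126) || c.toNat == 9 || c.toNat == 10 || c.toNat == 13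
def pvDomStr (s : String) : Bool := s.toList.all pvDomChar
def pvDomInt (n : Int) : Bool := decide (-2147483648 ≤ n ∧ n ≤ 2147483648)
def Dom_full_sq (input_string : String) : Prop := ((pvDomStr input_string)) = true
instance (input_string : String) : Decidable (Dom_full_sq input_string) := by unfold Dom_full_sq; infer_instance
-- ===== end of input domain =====

-- B changes the decomposition only: a cumulative-balance table is built first, then searched; same O(n) cost.

-- ===== PORT A =====
-- A's fused loop: update openpar per char, break with the current index when it hits 0;
-- isbreak stays 0 if the loop ends without breaking.
def fullSqLoopA : List Char → Int → Int → Int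
  | [], _, _ => 0
  | c :: rest, idx, openpar =>
    let openpar' := if c = '(' then openpar + 1 else if c = ')' then openpar - 1 else openpar
    if openpar' = 0 then idx else fullSqLoopA rest (idx + 1) openpar'

def full_sq (input_string : String) : Int :=
  fullSqLoopA input_string.toList 0 0

-- ===== PORT B =====
-- pass 1 of Source B: cumulative balance table
def fullSqCums : List Char → Int → List Int
  | [], _ => []
  | c :: rest, total =>
    let total' := total + (if c = '(' then 1 else if c = ')' then -1 else 0)
    total' :: fullSqCums rest total'

-- pass 2 of Source B: first index with value 0, else 0
def fullSqFindZero : List Int → Int → Int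
  | [], _ => 0
  | v :: rest, i => if v = 0 then i else fullSqFindZero rest (i + 1)

def full_sq_alt (input_string : String) : Int :=
  fullSqFindZero (fullSqCums input_string.toList 0) 0

-- ===== PRECONDITION & SPEC =====
def Spec_full_sq (input_string : String) (out : Int) : Prop := out = full_sq_alt input_string
instance (input_string : String) (out : Int) : Decidable (Spec_full_sq input_string out) := by unfold Spec_full_sq; infer_instance

-- ===== CLAIM (what is proved, stated in full; the proofs are below) =====
def Claim_equal_full_sq : Prop := ∀ (input_string : String), Dom_full_sq input_string → Spec_full_sq input_string (full_sq input_string)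

-- ===== LEMMAS AND PROOFS =====
theorem fullSq_loop_eq (cs : List Char) : ∀ (idx openpar : Int),
    fullSqLoopA cs idx openpar = fullSqFindZero (fullSqCums cs openpar) idx := by
  induction cs with
  | nil => intro idx openpar; rfl
  | cons c rest ih =>
    intro idx openpar
    have key : (if c = '(' then openpar + 1 else if c = ')' then openpar - 1 else openpar)
        = openpar + (if c = '(' then (1 : Int) else if c = ')' then -1 else 0) := by
      split_ifs <;> ring
    simp only [fullSqLoopA, fullSqCums, fullSqFindZero, key]
    split_ifs <;> first | rfl | exact ih (idx + 1) _

-- ===== VERDICT (by name: the statement is the Claim_ definition above) =====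
theorem full_sq_spec : Claim_equal_full_sq := by
  intro s _
  unfold Spec_full_sq full_sq full_sq_alt
  exact fullSq_loop_eq s.toList 0 0
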